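-- pv_equiv track=rewrite | github.com/Eylonl/financialsmadeeasy | sec_edgar.py | generate_fiscal_quarters
-- ===== SOURCE A (Python) =====
-- def generate_fiscal_quarters(fiscal_year_end_month: int) -> dict:
--     """Dynamically generate fiscal quarters based on the fiscal year end month"""
--     fiscal_year_start_month = (fiscal_year_end_month % 12) + 1
--     quarters = {}
--     current_month = fiscal_year_start_month
--     for q in range(1, 5):
--         start_month = current_month
--         end_month = (start_month + 2) % 12
--         if end_month == 0:
--             end_month = 12
--         quarters[q] = {'start_month': start_month, 'end_month': end_month}
--         current_month = (end_month % 12) + 1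
--     return quarters
-- ===== SOURCE B (Python) =====
-- def generate_fiscal_quarters(fiscal_year_end_month: int) -> dict:
--     """Each quarter's months as a closed form of q: no running current_month state."""
--     s = (fiscal_year_end_month % 12) + 1
--     return {q: {'start_month': ((s - 1 + 3 * (q - 1)) % 12) + 1,
--                 'end_month': ((s + 1 + 3 * (q - 1)) % 12) + 1}
--             for q in range(1, 5)}
-- ===== Notes on version B (the rewrite author's own statement) =====
-- stated objective: simpler
-- what changed: Replaced the sequential loop carrying a current_month accumulator (with a 0->12 wrap patch) by a dict comprehension computing each quarter's start and end month directly by modular arithmetic on q.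
import Mathlib
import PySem

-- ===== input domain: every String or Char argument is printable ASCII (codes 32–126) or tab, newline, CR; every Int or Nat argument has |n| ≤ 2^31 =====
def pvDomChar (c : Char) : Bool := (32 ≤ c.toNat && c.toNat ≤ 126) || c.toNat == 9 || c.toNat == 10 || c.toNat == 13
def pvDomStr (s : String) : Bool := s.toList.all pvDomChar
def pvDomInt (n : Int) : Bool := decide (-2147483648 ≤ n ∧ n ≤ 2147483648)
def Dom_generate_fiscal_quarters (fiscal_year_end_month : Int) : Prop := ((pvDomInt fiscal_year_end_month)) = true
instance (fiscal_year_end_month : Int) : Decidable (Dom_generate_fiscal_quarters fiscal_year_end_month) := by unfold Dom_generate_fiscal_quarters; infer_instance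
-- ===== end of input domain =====

-- B replaces A's sequential current_month accumulator by a closed form per quarter (objective: simpler).

-- ===== PORT A =====
def generate_fiscal_quarters (fiscal_year_end_month : Int) : List (Int × List (String × Int)) :=
  let fiscal_year_start_month := PySem.Int.mod fiscal_year_end_month 12 + 1
  ((PySem.List.pyRange 1 5 1).foldl
    (fun (st : List (Int × List (String × Int)) × Int) (q : Int) =>
      let start_month := st.2
      let e0 := PySem.Int.mod (start_month + 2) 12
      let end_month := if e0 = 0 then 12 else e0
      (st.1 ++ [(q, [("start_month", start_month), ("end_month", end_month)])],
       PySem.Int.mod end_month 12 + 1))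
    ([], fiscal_year_start_month)).1

-- ===== PORT B =====
def generate_fiscal_quarters_alt (fiscal_year_end_month : Int) : List (Int × List (String × Int)) :=
  let s := PySem.Int.mod fiscal_year_end_month 12 + 1
  (PySem.List.pyRange 1 5 1).map
    (fun q => (q, [("start_month", PySem.Int.mod (s - 1 + 3 * (q - 1)) 12 + 1),
                   ("end_month", PySem.Int.mod (s + 1 + 3 * (q - 1)) 12 + 1)]))

-- ===== PRECONDITION & SPEC =====
def Spec_generate_fiscal_quarters (fiscal_year_end_month : Int) (out : List (Int × List (String × Int))) : Prop := out = generate_fiscal_quarters_alt fiscal_year_end_month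
instance (fiscal_year_end_month : Int) (out : List (Int × List (String × Int))) : Decidable (Spec_generate_fiscal_quarters fiscal_year_end_month out) := by unfold Spec_generate_fiscal_quarters; infer_instance

-- ===== CLAIM (what is proved, stated in full; the proofs are below) =====
def Claim_equal_generate_fiscal_quarters : Prop := ∀ (fiscal_year_end_month : Int), Dom_generate_fiscal_quarters fiscal_year_end_month → Spec_generate_fiscal_quarters fiscal_year_end_month (generate_fiscal_quarters fiscal_year_end_month)

-- ===== LEMMAS AND PROOFS =====

-- ===== VERDICT (by name: the statement is the Claim_ definition above) =====
theorem generate_fiscal_quarters_spec : Claim_equal_generate_fiscal_quarters := by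
  intro m _
  unfold Spec_generate_fiscal_quarters generate_fiscal_quarters generate_fiscal_quarters_alt
  rw [PySem.Int.mod_eq_emod_of_pos (a := m) (by norm_num)]
  generalize h : m % 12 = r
  have h0 : 0 ≤ r := h ▸ Int.emod_nonneg m (by norm_num)
  have h1 : r < 12 := h ▸ Int.emod_lt_of_pos m (by norm_num)
  interval_cases r <;> decide
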